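-- pv_equiv track=rewrite | github.com/KingWitherBrine/py | other/cow_gate_I/cow_gate_I_III.py | solve
-- ===== SOURCE A (Python) =====
-- def solve(logs):
--     counts = {} # key: cow_num value: side
--     total = 0
--     for cow_num, side in logs:
--         if cow_num in counts:
--             if counts[cow_num] != side:
--                 total += 1
--         counts[cow_num] = side
--     return total
-- ===== SOURCE B (Python) =====
-- def solve(logs):
--     groups = {}
--     for cow_num, side in logs:
--         groups.setdefault(cow_num, []).append(side)
--     total = 0
--     for seq in groups.values():
--         total += sum(a != b for a, b in zip(seq, seq[1:]))
--     return total
-- ===== Notes on version B (the rewrite author's own statement) =====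
-- stated objective: alternative
-- what changed: A interleaves grouping and counting in one pass with a running last-side dict; B first groups each cow's sides into an ordered list and then sums adjacent differences per group in a second pass.
import Mathlib
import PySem

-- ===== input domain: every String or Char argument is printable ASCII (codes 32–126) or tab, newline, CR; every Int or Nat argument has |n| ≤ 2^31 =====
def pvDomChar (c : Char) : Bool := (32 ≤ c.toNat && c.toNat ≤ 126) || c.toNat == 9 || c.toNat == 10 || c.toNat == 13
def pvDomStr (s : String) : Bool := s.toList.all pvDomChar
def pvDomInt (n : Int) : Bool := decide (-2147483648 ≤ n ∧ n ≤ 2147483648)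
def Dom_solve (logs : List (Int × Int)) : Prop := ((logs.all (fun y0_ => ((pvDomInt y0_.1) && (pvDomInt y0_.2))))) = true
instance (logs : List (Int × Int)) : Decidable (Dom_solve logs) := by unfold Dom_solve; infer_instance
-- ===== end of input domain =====

-- B replaces A's single pass with a running last-side dict by two passes: group sides per cow, then
-- count adjacent differences in each group (objective: alternative decomposition, same cost).

-- ===== PORT A =====
-- one pass; state = (dict cow ↦ last side seen, running total)
def solve (logs : List (Int × Int)) : Int :=
  (logs.foldl
    (fun st p =>
      (st.1.insert p.1 p.2,
        if st.1.contains p.1 then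
          (if st.1.getD p.1 0 ≠ p.2 then st.2 + 1 else st.2)
        else st.2))
    ((PySem.Dict.empty : PySem.Dict Int Int), (0 : Int))).2

-- ===== PORT B =====
-- sum(a != b for a, b in zip(seq, seq[1:]))
def transCount (seq : List Int) : Int :=
  ((seq.zip (PySem.List.slice seq (some 1) none)).map
    (fun p => if p.1 ≠ p.2 then (1 : Int) else 0)).sum

-- first pass: groups[cow] = ordered list of that cow's sides; second pass: sum transCount over values
def solve_alt (logs : List (Int × Int)) : Int :=
  (((logs.foldl (fun d p => d.modify p.1 [] (· ++ [p.2]))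
      (PySem.Dict.empty : PySem.Dict Int (List Int))).values).map transCount).sum

-- ===== PRECONDITION & SPEC =====
def Spec_solve (logs : List (Int × Int)) (out : Int) : Prop := out = solve_alt logs
instance (logs : List (Int × Int)) (out : Int) : Decidable (Spec_solve logs out) := by unfold Spec_solve; infer_instance

-- ===== CLAIM (what is proved, stated in full; the proofs are below) =====
def Claim_equal_solve : Prop := ∀ (logs : List (Int × Int)), Dom_solve logs → Spec_solve logs (solve logs)

-- ===== LEMMAS AND PROOFS =====

-- transition count of each group, summed over the dict's items
def sumTrans (g : PySem.Dict Int (List Int)) : Int :=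
  (g.items.map (fun p => transCount p.2)).sum

theorem getD_getLast?_cons (x : Int) (xs : List Int) (d d' : Int) :
    (x :: xs).getLast?.getD d = (x :: xs).getLast?.getD d' := by
  induction xs generalizing x with
  | nil => rfl
  | cons y ys ih => exact ih y

theorem transCount_eq_tail (seq : List Int) :
    transCount seq =
      ((seq.zip seq.tail).map (fun p => if p.1 ≠ p.2 then (1 : Int) else 0)).sum := by
  rw [transCount, PySem.List.slice_from_one]

theorem zip_tail_append (l : List Int) (h : l ≠ []) (s : Int) :
    (l ++ [s]).zip (l ++ [s]).tail = l.zip l.tail ++ [(l.getLastD 0, s)] := by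
  induction l with
  | nil => exact absurd rfl h
  | cons x rest ih =>
    cases rest with
    | nil => simp
    | cons y rest' =>
      have := ih (by simp)
      simp only [List.cons_append, List.tail_cons, List.zip_cons_cons] at this ⊢
      rw [this, List.getLastD_cons]
      cases rest' with
      | nil => simp
      | cons z zs => simp [getD_getLast?_cons z zs y 0]

theorem transCount_append_last (l : List Int) (h : l ≠ []) (s : Int) :
    transCount (l ++ [s]) =
      transCount l + (if l.getLastD 0 ≠ s then (1 : Int) else 0) := by
  rw [transCount_eq_tail, transCount_eq_tail, zip_tail_append l h s]
  simp

theorem transCount_singleton (s : Int) : transCount [s] = 0 := by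
  simp [transCount_eq_tail]

-- the B-side grouping step is an insert of the extended list
theorem modify_append_eq_insert (d : PySem.Dict Int (List Int)) (k : Int) (s : Int) :
    d.modify k [] (· ++ [s]) = d.insert k (d.getD k [] ++ [s]) := by
  simp [PySem.Dict.modify]

-- replacing the unique entry with key k in an assoc list changes the transCount sum accordingly
theorem sum_map_replace (its : List (Int × List Int)) (k : Int) (l v : List Int)
    (hnd : (its.map Prod.fst).Nodup) (hmem : (k, l) ∈ its) :
    ((its.map (fun p => if p.1 == k then (k, v) else p)).map (fun p => transCount p.2)).sum
      = ((its.map (fun p => transCount p.2)).sum) - transCount l + transCount v := by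
  induction its with
  | nil => simp at hmem
  | cons a rest ih =>
    simp only [List.map_cons, List.nodup_cons] at hnd
    rcases List.mem_cons.mp hmem with hh | hh
    · subst hh
      have hrest : rest.map (fun p => if p.1 == k then (k, v) else p) = rest.map id := by
        apply List.map_congr_left
        intro p hp
        have hpk : (p.1 == k) = false := by
          have : p.1 ≠ k := fun e => hnd.1 (e ▸ List.mem_map.mpr ⟨p, hp, rfl⟩)
          simp [this]
        simp [hpk]
      simp only [List.map_cons, List.sum_cons, hrest, List.map_id, beq_self_eq_true, if_true]
      ring
    · have hk : (a.1 == k) = false := by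
        have : a.1 ≠ k := fun e => hnd.1 (e ▸ List.mem_map.mpr ⟨(k, l), hh, rfl⟩)
        simp [this]
      simp only [List.map_cons, hk, Bool.false_eq_true, if_false, List.sum_cons,
        ih hnd.2 hh]
      ring

theorem sumTrans_insert_not_contains (g : PySem.Dict Int (List Int)) (k : Int) (v : List Int)
    (h : g.contains k = false) :
    sumTrans (g.insert k v) = sumTrans g + transCount v := by
  unfold sumTrans
  rw [PySem.Dict.items_insert_of_not_contains g v h]
  simp

theorem sumTrans_insert_contains (g : PySem.Dict Int (List Int)) (k : Int) (l v : List Int)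
    (hnd : g.keys.Nodup) (hget : g.get? k = some l) :
    sumTrans (g.insert k v) = sumTrans g - transCount l + transCount v := by
  have hc : g.contains k = true := by
    rw [PySem.Dict.contains_eq_isSome_get?, hget]; rfl
  unfold sumTrans
  rw [PySem.Dict.items_insert_of_contains g v hc]
  have hmem : (k, l) ∈ g.items := PySem.Dict.mem_items_of_get?_eq_some g hget
  have hkeys : g.items.map Prod.fst = g.keys := by
    simp [PySem.Dict.keys]
  exact sum_map_replace g.items k l v (hkeys ▸ hnd) hmem

-- the invariant relating A's last-side dict to B's group dict
def RelAG (d : PySem.Dict Int Int) (g : PySem.Dict Int (List Int)) : Prop :=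
  (∀ k, d.contains k = g.contains k) ∧
  (∀ k v, g.get? k = some v → v ≠ [] ∧ d.get? k = some (v.getLastD 0))

theorem relAG_step (d : PySem.Dict Int Int) (g : PySem.Dict Int (List Int))
    (hR : RelAG d g) (c s : Int) (l : List Int) :
    RelAG (d.insert c s) (g.insert c (l ++ [s])) := by
  constructor
  · intro k; rw [PySem.Dict.contains_insert, PySem.Dict.contains_insert, hR.1 k]
  · intro k v hv
    by_cases hkc : k = c
    · subst hkc
      rw [PySem.Dict.get?_insert_self] at hv
      cases hv
      refine ⟨by simp, ?_⟩
      rw [PySem.Dict.get?_insert_self]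
      simp
    · rw [PySem.Dict.get?_insert_of_ne g _ hkc] at hv
      rw [PySem.Dict.get?_insert_of_ne d _ hkc]
      exact hR.2 k v hv

theorem main_invariant (logs : List (Int × Int)) :
    ∀ (d : PySem.Dict Int Int) (g : PySem.Dict Int (List Int)) (t : Int),
      RelAG d g → g.keys.Nodup →
      (logs.foldl
        (fun st p =>
          (st.1.insert p.1 p.2,
            if st.1.contains p.1 then
              (if st.1.getD p.1 0 ≠ p.2 then st.2 + 1 else st.2)
            else st.2)) (d, t)).2
        = t + sumTrans (logs.foldl (fun d' p => d'.modify p.1 [] (· ++ [p.2])) g) - sumTrans g := by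
  induction logs with
  | nil => intro d g t _ _; simp
  | cons p rest ih =>
    intro d g t hR hnd
    obtain ⟨c, s⟩ := p
    simp only [List.foldl_cons]
    rw [modify_append_eq_insert]
    cases hgc : g.get? c with
    | some l =>
      -- cow already seen: g has a nonempty list l for c
      obtain ⟨hlne, hdget⟩ := hR.2 c l hgc
      have hdc : d.contains c = true := by
        rw [PySem.Dict.contains_eq_isSome_get?, hdget]; rfl
      have hdgetD : d.getD c 0 = l.getLastD 0 := PySem.Dict.getD_of_get?_eq_some d 0 hdget
      have hggetD : g.getD c [] = l := PySem.Dict.getD_of_get?_eq_some g [] hgc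
      rw [hggetD,
          ih (d.insert c s) (g.insert c (l ++ [s])) _ (relAG_step d g hR c s l)
            (PySem.Dict.nodup_keys_insert g c (l ++ [s]) hnd),
          sumTrans_insert_contains g c l (l ++ [s]) hnd hgc,
          transCount_append_last l hlne s]
      simp only [hdc, if_true, hdgetD]
      split_ifs <;> ring
    | none =>
      -- new cow
      have hdnone : d.get? c = none := by
        have h1 := hR.1 c
        rw [PySem.Dict.contains_eq_isSome_get?, PySem.Dict.contains_eq_isSome_get?, hgc] at h1
        exact Option.not_isSome_iff_eq_none.mp (by simp [h1])
      have hdc : d.contains c = false := by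
        rw [PySem.Dict.contains_eq_isSome_get?, hdnone]; rfl
      have hcf : g.contains c = false := by
        rw [PySem.Dict.contains_eq_isSome_get?, hgc]; rfl
      have hggetD : g.getD c [] = [] := PySem.Dict.getD_of_get?_eq_none g [] hgc
      have hR' : RelAG (d.insert c s) (g.insert c ([] ++ [s])) := relAG_step d g hR c s []
      rw [hggetD]
      rw [show (([] : List Int) ++ [s]) = [s] from rfl] at hR' ⊢
      rw [ih (d.insert c s) (g.insert c [s]) _ hR'
            (PySem.Dict.nodup_keys_insert g c [s] hnd),
          sumTrans_insert_not_contains g c [s] hcf]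
      simp only [hdc, Bool.false_eq_true, if_false, transCount_singleton]
      ring

theorem relAG_empty : RelAG PySem.Dict.empty PySem.Dict.empty := by
  constructor
  · intro k; rfl
  · intro k v hv
    rw [PySem.Dict.get?_empty] at hv
    cases hv

-- ===== VERDICT (by name: the statement is the Claim_ definition above) =====
theorem solve_spec : Claim_equal_solve := by
  intro logs _
  unfold Spec_solve solve solve_alt
  rw [main_invariant logs PySem.Dict.empty PySem.Dict.empty 0 relAG_empty
        PySem.Dict.nodup_keys_empty]
  simp [sumTrans, PySem.Dict.values, Function.comp_def, PySem.Dict.empty]
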